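-- pv_equiv track=rewrite | github.com/JeonJe/Algorithm | 프로그래머스/unrated/160586. 대충 만든 자판/대충 만든 자판.py | solution
-- ===== SOURCE A (Python) =====
-- from collections import defaultdict
--
-- def solution(keymap, targets):
--     answer = []
--     dict = defaultdict()
--
--     for k in keymap:
--         for index, value in enumerate(k):
--             if value in dict.keys():
--                 dict[value] = min(dict[value], index)
--             else:
--                 dict[value] = index
--
--     for T in targets:
--         temp = 0
--         not_found = False
--         for c in T:
--             if c not in dict.keys():
--                 not_found = True
--             else:
--                 temp += dict[c] + 1
--
--         if not_found:
--             answer.append(-1)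
--         else:
--             answer.append(temp)
--
--     return answer
-- ===== SOURCE B (Python) =====
-- def solution(keymap, targets):
--     answer = []
--     for T in targets:
--         total = 0
--         found_all = True
--         for c in T:
--             best = -1
--             for k in keymap:
--                 i = k.find(c)
--                 if i != -1 and (best == -1 or i < best):
--                     best = i
--             if best == -1:
--                 found_all = False
--             else:
--                 total += best + 1
--         answer.append(total if found_all else -1)
--     return answer
-- ===== Notes on version B (the rewrite author's own statement) =====
-- stated objective: simpler
-- what changed: Drops the precomputed min-index dictionary: for each target character B scans the keymap strings directly with str.find and folds the minimum first-occurrence index on the fly.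
import Mathlib
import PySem

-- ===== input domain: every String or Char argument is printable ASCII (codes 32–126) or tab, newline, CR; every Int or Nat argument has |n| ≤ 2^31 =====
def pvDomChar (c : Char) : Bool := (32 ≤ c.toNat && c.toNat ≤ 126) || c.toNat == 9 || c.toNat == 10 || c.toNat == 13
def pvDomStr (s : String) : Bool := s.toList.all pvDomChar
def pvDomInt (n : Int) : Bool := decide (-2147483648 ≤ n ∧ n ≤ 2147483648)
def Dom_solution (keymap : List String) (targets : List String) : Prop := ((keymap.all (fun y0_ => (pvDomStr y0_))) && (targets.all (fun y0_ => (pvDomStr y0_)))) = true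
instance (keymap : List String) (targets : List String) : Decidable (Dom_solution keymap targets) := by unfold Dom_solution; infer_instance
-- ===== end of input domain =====

-- B drops A's precomputed min-index dictionary and, per target character, scans the
-- keymap strings directly with str.find, folding the minimum index on the fly (simpler decomposition, not faster).

-- ===== PORT A =====
-- dict[value] = min(dict[value], index) if present else index
def solnUpd (d : PySem.Dict Char Int) (p : Int × Char) : PySem.Dict Char Int :=
  match d.get? p.2 with
  | some m => d.insert p.2 (min m p.1)
  | none   => d.insert p.2 p.1

def solnDict (keymap : List String) : PySem.Dict Char Int :=
  keymap.foldl (fun d k => (PySem.List.enumerate k.toList 0).foldl solnUpd d) PySem.Dict.empty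

def solution (keymap : List String) (targets : List String) : List Int :=
  let d := solnDict keymap
  targets.foldl (fun ans T =>
    let st := T.toList.foldl (fun (st : Int × Bool) c =>
      match d.get? c with
      | none   => (st.1, true)
      | some m => (st.1 + (m + 1), st.2)) ((0 : Int), false)
    ans ++ [if st.2 then (-1 : Int) else st.1]) []

-- ===== PORT B =====
def altBestStep (c : Char) (best : Int) (k : String) : Int :=
  let i := PySem.Str.find k (String.ofList [c])
  if i ≠ -1 ∧ (best = -1 ∨ i < best) then i else best

def altBest (keymap : List String) (c : Char) : Int :=
  keymap.foldl (altBestStep c) (-1)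

def solution_alt (keymap : List String) (targets : List String) : List Int :=
  targets.foldl (fun ans T =>
    let st := T.toList.foldl (fun (st : Int × Bool) c =>
      let b := altBest keymap c
      if b = -1 then (st.1, false) else (st.1 + (b + 1), st.2)) ((0 : Int), true)
    ans ++ [if st.2 then st.1 else (-1 : Int)]) []

-- ===== PRECONDITION & SPEC =====
def Spec_solution (keymap : List String) (targets : List String) (out : List Int) : Prop := out = solution_alt keymap targets
instance (keymap : List String) (targets : List String) (out : List Int) : Decidable (Spec_solution keymap targets out) := by unfold Spec_solution; infer_instance

-- ===== CLAIM (what is proved, stated in full; the proofs are below) =====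
def Claim_equal_solution : Prop := ∀ (keymap : List String) (targets : List String), Dom_solution keymap targets → Spec_solution keymap targets (solution keymap targets)

-- ===== LEMMAS AND PROOFS =====

theorem pv_singleton_prefix_iff (c : Char) (l : List Char) : [c] <+: l ↔ l.head? = some c := by
  constructor
  · rintro ⟨t, rfl⟩; rfl
  · cases l with
    | nil => simp
    | cons x xs => intro h; simp at h; exact ⟨xs, by simp [h]⟩

theorem pv_singleton_infix_iff (c : Char) (l : List Char) : [c] <:+: l ↔ c ∈ l := by
  constructor
  · intro h; simpa using h.sublist
  · intro h
    obtain ⟨s, t, rfl⟩ := List.append_of_mem h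
    exact ⟨s, t, by simp⟩

theorem pv_find_singleton (s : List Char) (c : Char) :
    PySem.Chars.find s [c] =
      (match PySem.List.index? s c with
       | none => (-1 : Int)
       | some j => (j : Int)) := by
  cases h : PySem.List.index? s c with
  | none =>
    have hnm : c ∉ s := (PySem.List.index?_eq_none_iff s c).mp h
    simp only []
    exact PySem.Chars.find_eq_neg_one_iff s [c] |>.mpr (fun hin => hnm ((pv_singleton_infix_iff c s).mp hin))
  | some j =>
    obtain ⟨hj, hget, hfirst⟩ := PySem.List.getElem_of_index?_eq_some h
    have hmem : c ∈ s := by rw [← hget]; exact List.getElem_mem hj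
    have h0 : 0 ≤ PySem.Chars.find s [c] :=
      (PySem.Chars.find_nonneg_iff s [c]).mpr ((pv_singleton_infix_iff c s).mpr hmem)
    obtain ⟨hpre, hmin⟩ := PySem.Chars.find_spec (s := s) (sub := [c]) h0
    set n := (PySem.Chars.find s [c]).toNat with hn
    have hhead : s[n]? = some c := by
      have := (pv_singleton_prefix_iff c (s.drop n)).mp hpre
      rwa [List.head?_drop] at this
    have hnlt : n < s.length := by
      by_contra hge
      rw [List.getElem?_eq_none (by omega)] at hhead
      simp at hhead
    have hne : ¬ j < n := by
      intro hlt
      exact hmin j hlt ((pv_singleton_prefix_iff c (s.drop j)).mpr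
        (by rw [List.head?_drop, List.getElem?_eq_getElem hj, hget]))
    have hne' : ¬ n < j := by
      intro hlt
      apply hfirst n hlt
      rw [List.getElem?_eq_getElem hnlt] at hhead
      simpa using hhead
    have hnj : n = j := by omega
    simp only []
    omega

theorem pv_find_singleton_none {s : List Char} {c : Char} (h : PySem.List.index? s c = none) :
    PySem.Chars.find s [c] = -1 := by rw [pv_find_singleton, h]

theorem pv_find_singleton_some {s : List Char} {c : Char} {j : Nat} (h : PySem.List.index? s c = some j) :
    PySem.Chars.find s [c] = (j : Int) := by rw [pv_find_singleton, h]

-- A's inner enumerate-fold: lookup of c afterwards is min(old, start + first index of c)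
theorem pv_dict_fold_get (xs : List Char) : ∀ (s : Int) (d : PySem.Dict Char Int) (c : Char),
    ((PySem.List.enumerate xs s).foldl solnUpd d).get? c =
      (match PySem.List.index? xs c with
       | none => d.get? c
       | some j =>
         match d.get? c with
         | none => some (s + j)
         | some m => some (min m (s + j))) := by
  induction xs with
  | nil => intro s d c; simp [PySem.List.enumerate_nil, PySem.List.index?]
  | cons x rest ih =>
    intro s d c
    rw [PySem.List.enumerate_cons, List.foldl_cons, ih (s + 1) (solnUpd d (s, x)) c]
    by_cases hxc : x = c
    · subst hxc
      have hup : (solnUpd d (s, x)).get? x =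
          some (match d.get? x with | none => s | some m => min m s) := by
        unfold solnUpd
        cases hd : d.get? x with
        | none => simp [hd, PySem.Dict.get?_insert_self]
        | some m => simp [hd, PySem.Dict.get?_insert_self]
      rw [PySem.List.index?_cons_self]
      cases hr : PySem.List.index? rest x with
      | none =>
        simp only [hr, hup]
        cases hd : d.get? x <;> simp [hd] at hup ⊢ <;> omega
      | some j =>
        simp only [hr, hup]
        cases hd : d.get? x <;> simp [hd] at hup ⊢ <;> omega
    · have hup : (solnUpd d (s, x)).get? c = d.get? c := by
        unfold solnUpd
        cases hd : d.get? x with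
        | none => simp [hd, PySem.Dict.get?_insert_of_ne _ _ (Ne.symm hxc)]
        | some m => simp [hd, PySem.Dict.get?_insert_of_ne _ _ (Ne.symm hxc)]
      rw [PySem.List.index?_cons_of_ne rest hxc, hup]
      cases hr : PySem.List.index? rest c with
      | none => simp [hr]
      | some j =>
        simp only [hr, Option.map_some]
        cases hd : d.get? c <;> simp [hd] <;> ring_nf
-- dict lookup after the whole build ↔ B's best-fold, via the per-string steps
theorem pv_inv (keymap : List String) : ∀ (d : PySem.Dict Char Int) (b : Int) (c : Char),
    (d.get? c = if b = -1 then none else some b) → (b = -1 ∨ 0 ≤ b) →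
    ((keymap.foldl (fun d k => (PySem.List.enumerate k.toList 0).foldl solnUpd d) d).get? c =
       (if keymap.foldl (altBestStep c) b = -1 then none else some (keymap.foldl (altBestStep c) b))) := by
  induction keymap with
  | nil => intro d b c h1 _; simpa using h1
  | cons k rest ih =>
    intro d b c h1 h2
    rw [List.foldl_cons, List.foldl_cons]
    have hstep := pv_dict_fold_get k.toList 0 d c
    cases hr : PySem.List.index? k.toList c with
    | none =>
      have hb' : altBestStep c b k = b := by
        unfold altBestStep
        simp only [PySem.Str.find_eq]
        rw [show (String.ofList [c]).toList = [c] from by simp, pv_find_singleton_none hr]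
        simp
      rw [hb']
      apply ih _ b c _ h2
      rw [hstep, hr, h1]
    | some j =>
      by_cases hb : b = -1
      · subst hb
        have hb' : altBestStep c (-1) k = (j : Int) := by
          unfold altBestStep
          simp only [PySem.Str.find_eq]
          rw [show (String.ofList [c]).toList = [c] from by simp, pv_find_singleton_some hr]
          split_ifs with h
          · rfl
          · exact absurd ⟨by omega, Or.inl trivial⟩ h
        rw [hb']
        apply ih _ _ c _ (Or.inr (by omega))
        rw [hstep, hr, h1]
        have hj : ¬ (j : Int) = -1 := by omega
        simp [hj]
      · have h0b : 0 ≤ b := h2.resolve_left hb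
        have hb' : altBestStep c b k = min b (j : Int) := by
          unfold altBestStep
          simp only [PySem.Str.find_eq]
          rw [show (String.ofList [c]).toList = [c] from by simp, pv_find_singleton_some hr]
          split_ifs with h <;> omega
        rw [hb']
        apply ih _ _ c _ (Or.inr (by omega))
        rw [hstep, hr, h1, if_neg hb]
        have hm : ¬ min b (j : Int) = -1 := by omega
        simp [hm]

theorem pv_dict_eq_best (keymap : List String) (c : Char) :
    (solnDict keymap).get? c =
      (if altBest keymap c = -1 then none else some (altBest keymap c)) := by
  unfold solnDict altBest
  exact pv_inv keymap PySem.Dict.empty (-1) c (by simp [PySem.Dict.get?_empty]) (Or.inl rfl)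

theorem pv_target_fold (keymap : List String) (cs : List Char) :
    ∀ (t : Int) (g : Bool),
    (cs.foldl (fun (st : Int × Bool) c =>
        let b := altBest keymap c
        if b = -1 then (st.1, false) else (st.1 + (b + 1), st.2)) (t, g)) =
    ((cs.foldl (fun (st : Int × Bool) c =>
        match (solnDict keymap).get? c with
        | none   => (st.1, true)
        | some m => (st.1 + (m + 1), st.2)) (t, !g)).1,
     !(cs.foldl (fun (st : Int × Bool) c =>
        match (solnDict keymap).get? c with
        | none   => (st.1, true)
        | some m => (st.1 + (m + 1), st.2)) (t, !g)).2) := by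
  induction cs with
  | nil => intro t g; simp
  | cons c cs ih =>
    intro t g
    rw [List.foldl_cons, List.foldl_cons, pv_dict_eq_best keymap c]
    by_cases hb : altBest keymap c = -1
    · simpa [hb] using ih t false
    · simpa [hb] using ih (t + (altBest keymap c + 1)) g

theorem pv_main (keymap targets : List String) :
    solution keymap targets = solution_alt keymap targets := by
  unfold solution solution_alt
  simp only []
  induction targets using List.reverseRecOn with
  | nil => rfl
  | append_singleton ts T ih =>
    rw [List.foldl_append, List.foldl_append, ← ih, List.foldl_cons, List.foldl_nil,
        List.foldl_cons, List.foldl_nil]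
    congr 1
    rw [pv_target_fold keymap T.toList 0 true]
    simp only [Bool.not_true]
    cases (T.toList.foldl (fun (st : Int × Bool) c =>
        match (solnDict keymap).get? c with
        | none   => (st.1, true)
        | some m => (st.1 + (m + 1), st.2)) ((0 : Int), false)).2 <;> simp

-- ===== VERDICT (by name: the statement is the Claim_ definition above) =====
theorem solution_spec : Claim_equal_solution := by
  intro keymap targets _
  unfold Spec_solution
  exact pv_main keymap targets
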